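-- pv_equiv track=rewrite | github.com/AndreaBonn/video-anonimyzer | person_anonymizer/rendering.py | compute_review_stats
-- ===== SOURCE A (Python) =====
-- def compute_review_stats(original, reviewed, total_frames):
--     """Calcola statistiche di review confrontando annotazioni prima e dopo.
--
--     Parameters
--     ----------
--     original : dict
--         Annotazioni originali {frame_idx: {auto: [...], manual: [...]}}.
--     reviewed : dict
--         Annotazioni dopo la review.
--     total_frames : int
--         Numero totale di frame nel video.
--
--     Returns
--     -------
--     dict
--         Contiene added, removed, frames_modified, frames_reviewed.
--     """
--     added = 0
--     removed = 0
--     frames_modified = 0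
--
--     all_frames = set(original.keys()) | set(reviewed.keys())
--     for fidx in all_frames:
--         orig_auto = original.get(fidx, {}).get("auto", [])
--         orig_manual = original.get(fidx, {}).get("manual", [])
--         orig_count = len(orig_auto) + len(orig_manual)
--
--         rev_auto = reviewed.get(fidx, {}).get("auto", [])
--         rev_manual = reviewed.get(fidx, {}).get("manual", [])
--         rev_count = len(rev_auto) + len(rev_manual)
--
--         diff = rev_count - orig_count
--         if diff > 0:
--             added += diff
--         elif diff < 0:
--             removed += abs(diff)
--
--         if rev_count != orig_count:
--             frames_modified += 1
--
--     return {
--         "added": added,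
--         "removed": removed,
--         "frames_modified": frames_modified,
--         "frames_reviewed": total_frames,
--     }
-- ===== SOURCE B (Python) =====
-- def compute_review_stats(original, reviewed, total_frames):
--     def count(entry):
--         return len(entry.get("auto", [])) + len(entry.get("manual", []))
--
--     # signed counter: stream original's items (negative), then reviewed's (positive);
--     # no key-union is ever built and neither dict is looked up per union key
--     delta = {f: -count(e) for f, e in original.items()}
--     for f, e in reviewed.items():
--         delta[f] = delta.get(f, 0) + count(e)
--
--     vals = list(delta.values())
--     return {
--         "added": sum(v for v in vals if v > 0),
--         "removed": -sum(v for v in vals if v < 0),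
--         "frames_modified": sum(1 for v in vals if v),
--         "frames_reviewed": total_frames,
--     }
-- ===== Notes on version B (the rewrite author's own statement) =====
-- stated objective: alternative
-- what changed: Instead of building the union of frame keys and looking both dicts up per union key inside one branchy three-counter loop, B streams each dict's items once into a signed counter dict (original subtracts, reviewed adds) and then reduces the counter's values in three separate passes.
import Mathlib
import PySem

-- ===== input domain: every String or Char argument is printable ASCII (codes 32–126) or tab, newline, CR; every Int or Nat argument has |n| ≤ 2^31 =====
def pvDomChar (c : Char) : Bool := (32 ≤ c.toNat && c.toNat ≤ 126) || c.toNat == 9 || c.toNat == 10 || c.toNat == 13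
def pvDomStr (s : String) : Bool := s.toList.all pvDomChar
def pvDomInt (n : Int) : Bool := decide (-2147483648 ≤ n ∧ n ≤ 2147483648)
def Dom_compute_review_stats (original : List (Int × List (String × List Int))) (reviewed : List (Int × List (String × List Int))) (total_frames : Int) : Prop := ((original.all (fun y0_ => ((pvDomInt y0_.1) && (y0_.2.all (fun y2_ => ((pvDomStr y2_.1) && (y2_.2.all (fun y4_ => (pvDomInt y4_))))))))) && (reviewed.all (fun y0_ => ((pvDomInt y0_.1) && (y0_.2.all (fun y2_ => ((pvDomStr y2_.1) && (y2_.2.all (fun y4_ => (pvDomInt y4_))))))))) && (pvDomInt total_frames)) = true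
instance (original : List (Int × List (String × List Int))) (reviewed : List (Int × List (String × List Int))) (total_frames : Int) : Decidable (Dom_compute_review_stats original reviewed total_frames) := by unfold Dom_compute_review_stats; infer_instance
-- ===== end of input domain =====

-- B replaces A's key-union + per-union-key lookups + one branchy three-counter loop by streaming
-- each dict's items once into a signed counter dict, then reducing its values in three passes
-- (objective: alternative; same asymptotic cost).


-- ===== PORT A =====
-- the body of A's 'for fidx in all_frames' loop, acting on the accumulator (added, removed, frames_modified)
def pvStepA (original : List (Int × List (String × List Int))) (reviewed : List (Int × List (String × List Int))) (acc : Int × Int × Int) (fidx : Int) : Int × Int × Int :=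
  let orig_auto := PySem.Dict.getD (PySem.Dict.mk (PySem.Dict.getD (PySem.Dict.mk original) fidx [])) "auto" []
  let orig_manual := PySem.Dict.getD (PySem.Dict.mk (PySem.Dict.getD (PySem.Dict.mk original) fidx [])) "manual" []
  let orig_count : Int := (orig_auto.length : Int) + (orig_manual.length : Int)
  let rev_auto := PySem.Dict.getD (PySem.Dict.mk (PySem.Dict.getD (PySem.Dict.mk reviewed) fidx [])) "auto" []
  let rev_manual := PySem.Dict.getD (PySem.Dict.mk (PySem.Dict.getD (PySem.Dict.mk reviewed) fidx [])) "manual" []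
  let rev_count : Int := (rev_auto.length : Int) + (rev_manual.length : Int)
  let diff := rev_count - orig_count
  let acc1 : Int × Int × Int :=
    if diff > 0 then (acc.1 + diff, acc.2.1, acc.2.2)
    else if diff < 0 then (acc.1, acc.2.1 + |diff|, acc.2.2)
    else acc
  if rev_count ≠ orig_count then (acc1.1, acc1.2.1, acc1.2.2 + 1) else acc1

def compute_review_stats (original : List (Int × List (String × List Int))) (reviewed : List (Int × List (String × List Int))) (total_frames : Int) : List (String × Int) :=
  let all_frames := PySem.Set.union (PySem.Set.ofList (original.map (·.1))) (PySem.Set.ofList (reviewed.map (·.1)))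
  let st := all_frames.foldl (pvStepA original reviewed) (0, 0, 0)
  [("added", st.1), ("removed", st.2.1), ("frames_modified", st.2.2), ("frames_reviewed", total_frames)]

-- ===== PORT B =====
-- Source B's count(entry) applied to ann's entry at fidx ({} when absent):
-- iterating a dict's .items() is ported through the encoding's accessor (distinct keys in
-- first-insertion order, each paired with its first-match lookup — exact for the dict encoding)
def pvCount (ann : List (Int × List (String × List Int))) (fidx : Int) : Int :=
  let entry := PySem.Dict.getD (PySem.Dict.mk ann) fidx []
  ((PySem.Dict.getD (PySem.Dict.mk entry) "auto" []).length : Int) + ((PySem.Dict.getD (PySem.Dict.mk entry) "manual" []).length : Int)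

def compute_review_stats_alt (original : List (Int × List (String × List Int))) (reviewed : List (Int × List (String × List Int))) (total_frames : Int) : List (String × Int) :=
  -- delta = {f: -count(e) for f, e in original.items()}
  let delta0 : PySem.Dict Int Int :=
    PySem.Dict.mk ((PySem.Set.ofList (original.map (·.1))).map (fun f => (f, -pvCount original f)))
  -- for f, e in reviewed.items(): delta[f] = delta.get(f, 0) + count(e)
  let delta := (PySem.Set.ofList (reviewed.map (·.1))).foldl
      (fun d f => PySem.Dict.insert d f (PySem.Dict.getD d f 0 + pvCount reviewed f)) delta0
  let vals := PySem.Dict.values delta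
  [("added", (vals.filter (fun v => v > 0)).sum),
   ("removed", -((vals.filter (fun v => v < 0)).sum)),
   ("frames_modified", (((vals.filter (fun v => v ≠ 0)).map (fun _ => (1 : Int))).sum)),
   ("frames_reviewed", total_frames)]

-- ===== PRECONDITION & SPEC =====
def Spec_compute_review_stats (original : List (Int × List (String × List Int))) (reviewed : List (Int × List (String × List Int))) (total_frames : Int) (out : List (String × Int)) : Prop := out = compute_review_stats_alt original reviewed total_frames
instance (original : List (Int × List (String × List Int))) (reviewed : List (Int × List (String × List Int))) (total_frames : Int) (out : List (String × Int)) : Decidable (Spec_compute_review_stats original reviewed total_frames out) := by unfold Spec_compute_review_stats; infer_instance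

-- ===== CLAIM (what is proved, stated in full; the proofs are below) =====
def Claim_equal_compute_review_stats : Prop := ∀ (original : List (Int × List (String × List Int))) (reviewed : List (Int × List (String × List Int))) (total_frames : Int), Dom_compute_review_stats original reviewed total_frames → Spec_compute_review_stats original reviewed total_frames (compute_review_stats original reviewed total_frames)

-- ===== LEMMAS AND PROOFS =====

-- A's step on a frame is a function of the diff alone
theorem pvStepA_eq (original reviewed : List (Int × List (String × List Int))) (acc : Int × Int × Int) (fidx : Int) :
    pvStepA original reviewed acc fidx =
      (let d := pvCount reviewed fidx - pvCount original fidx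
       let acc1 : Int × Int × Int :=
         if d > 0 then (acc.1 + d, acc.2.1, acc.2.2)
         else if d < 0 then (acc.1, acc.2.1 + |d|, acc.2.2)
         else acc
       if d ≠ 0 then (acc1.1, acc1.2.1, acc1.2.2 + 1) else acc1) := by
  unfold pvStepA pvCount
  dsimp only
  split_ifs <;> first | rfl | omega

-- A's branchy fold over a list of frames equals the three reductions over the diffs
theorem pv_fold_diffs (g : Int → Int) :
    ∀ (ds : List Int) (a r m : Int),
      ds.foldl (fun (acc : Int × Int × Int) f =>
        let d := g f
        let acc1 : Int × Int × Int :=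
          if d > 0 then (acc.1 + d, acc.2.1, acc.2.2)
          else if d < 0 then (acc.1, acc.2.1 + |d|, acc.2.2)
          else acc
        if d ≠ 0 then (acc1.1, acc1.2.1, acc1.2.2 + 1) else acc1) (a, r, m)
      = (a + (((ds.map g).filter (fun d => d > 0)).sum),
         r + -(((ds.map g).filter (fun d => d < 0)).sum),
         m + ((((ds.map g).filter (fun d => d ≠ 0)).map (fun _ => (1 : Int))).sum)) := by
  intro ds
  induction ds with
  | nil => intro a r m; simp
  | cons x xs ih =>
    intro a r m
    simp only [List.foldl_cons, List.map_cons, List.filter_cons]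
    rcases lt_trichotomy (g x) 0 with h | h | h
    · have h1 : ¬ g x > 0 := by omega
      have h2 : g x ≠ 0 := by omega
      simp only [h, h1, h2, if_true, if_false, ne_eq, not_false_eq_true,
        decide_true, decide_false]
      rw [ih]
      simp only [List.sum_cons, List.map_cons, Prod.mk.injEq]
      refine ⟨rfl, ?_, by ring⟩
      rw [abs_of_neg h]; ring
    · simp only [h, lt_irrefl, gt_iff_lt, ne_eq, not_true_eq_false, decide_false]
      rw [ih]
      simp
    · have h1 : ¬ g x < 0 := by omega
      have h2 : g x ≠ 0 := by omega
      simp only [h, h1, h2, gt_iff_lt, ite_true, ite_false, ne_eq, not_false_eq_true,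
        decide_true, decide_false]
      rw [ih]
      simp only [List.sum_cons, List.map_cons, Prod.mk.injEq]
      exact ⟨by ring, rfl, by ring⟩

-- a frame outside ann's keys contributes count 0
theorem pvCount_of_not_mem (ann : List (Int × List (String × List Int))) (f : Int)
    (h : f ∉ ann.map (·.1)) : pvCount ann f = 0 := by
  unfold pvCount
  have hc : (PySem.Dict.mk ann).contains f = false := by
    have := PySem.Dict.contains_eq_decide_mem_keys (d := PySem.Dict.mk ann) (k := f)
    simp only [this, PySem.Dict.keys_mk, decide_eq_false_iff_not]
    exact h
  rw [PySem.Dict.getD_of_not_contains _ _ hc]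
  rfl

-- getD after the accumulate-insert fold over a Nodup key list
theorem pv_getD_fold (c : Int → Int) :
    ∀ (ks : List Int) (d : PySem.Dict Int Int) (f : Int), ks.Nodup →
      (ks.foldl (fun d k => PySem.Dict.insert d k (PySem.Dict.getD d k 0 + c k)) d).getD f 0
        = d.getD f 0 + (if f ∈ ks then c f else 0) := by
  intro ks
  induction ks with
  | nil => intro d f _; simp
  | cons x xs ih =>
    intro d f hnd
    have hnd' := hnd
    rw [List.nodup_cons] at hnd'
    simp only [List.foldl_cons]
    rw [ih _ f hnd'.2, PySem.Dict.getD_insert]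
    by_cases hfx : f = x
    · subst hfx
      have : f ∉ xs := hnd'.1
      simp [this]
    · simp [hfx, List.mem_cons]

-- ===== VERDICT (by name: the statement is the Claim_ definition above) =====
theorem compute_review_stats_spec : Claim_equal_compute_review_stats := by
  intro original reviewed total_frames _
  unfold Spec_compute_review_stats compute_review_stats compute_review_stats_alt
  dsimp only
  set K1 := PySem.Set.ofList (original.map (·.1)) with hK1
  set K2 := PySem.Set.ofList (reviewed.map (·.1)) with hK2
  set g : Int → Int := fun f => pvCount reviewed f - pvCount original f with hg
  -- step 1: B's counter dict has values (Set.update K1 K2).map g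
  set delta0 : PySem.Dict Int Int := PySem.Dict.mk (K1.map (fun f => (f, -pvCount original f))) with hdelta0
  set delta := K2.foldl (fun d f => PySem.Dict.insert d f (PySem.Dict.getD d f 0 + pvCount reviewed f)) delta0 with hdelta
  have hk0 : delta0.keys = K1 := by
    simp [hdelta0, PySem.Dict.keys, List.map_map, Function.comp_def]
  have hk0nd : delta0.keys.Nodup := by rw [hk0]; exact PySem.Set.nodup_ofList _
  have hkeys : delta.keys = PySem.Set.update K1 K2 := by
    rw [hdelta, PySem.Dict.keys_foldl_insert, hk0]
  have hknd : delta.keys.Nodup := by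
    rw [hdelta]; exact PySem.Dict.nodup_keys_foldl_insert _ _ _ hk0nd
  have hget0 : ∀ f : Int, delta0.getD f 0 = if f ∈ K1 then -pvCount original f else 0 := by
    intro f
    by_cases hf : f ∈ K1
    · have hmem : (f, -pvCount original f) ∈ delta0.items := by
        simp only [hdelta0]
        exact List.mem_map.mpr ⟨f, hf, rfl⟩
      rw [PySem.Dict.getD_of_mem_items _ hmem hk0nd]
      simp [hf]
    · have hc : delta0.contains f = false := by
        rw [PySem.Dict.contains_eq_decide_mem_keys, hk0, decide_eq_false_iff_not]
        exact hf
      rw [PySem.Dict.getD_of_not_contains _ _ hc]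
      simp [hf]
  have hget : ∀ f : Int, delta.getD f 0 = delta0.getD f 0 + (if f ∈ K2 then pvCount reviewed f else 0) :=
    fun f => pv_getD_fold _ K2 delta0 f (PySem.Set.nodup_ofList _)
  have hvals : delta.values = (PySem.Set.update K1 K2).map g := by
    rw [PySem.Dict.values_eq_map_keys delta hknd 0, hkeys]
    apply List.map_congr_left
    intro f hf
    rw [hget f, hget0 f]
    have hfu : f ∈ K1 ∨ f ∈ K2 := (PySem.Set.mem_update _ _ _).mp hf
    by_cases h1 : f ∈ K1 <;> by_cases h2 : f ∈ K2 <;> simp only [h1, h2, if_true, if_false, hg]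
    · ring
    · rw [pvCount_of_not_mem reviewed f (by simpa [hK2, PySem.Set.mem_ofList] using h2)]; ring
    · rw [pvCount_of_not_mem original f (by simpa [hK1, PySem.Set.mem_ofList] using h1)]; ring
    · rcases hfu with h | h
      · exact absurd h h1
      · exact absurd h h2
  -- step 2: A's fold is the three reductions over the same diff list
  have hstep : (PySem.Set.union K1 K2).foldl (pvStepA original reviewed) (0, 0, 0)
      = (PySem.Set.union K1 K2).foldl (fun (acc : Int × Int × Int) f =>
          let d := g f
          let acc1 : Int × Int × Int :=
            if d > 0 then (acc.1 + d, acc.2.1, acc.2.2)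
            else if d < 0 then (acc.1, acc.2.1 + |d|, acc.2.2)
            else acc
          if d ≠ 0 then (acc1.1, acc1.2.1, acc1.2.2 + 1) else acc1) (0, 0, 0) := by
    apply PySem.List.foldl_congr_mem
    intro acc f _
    exact pvStepA_eq original reviewed acc f
  rw [hstep, pv_fold_diffs g]
  have huu : PySem.Set.union K1 K2 = PySem.Set.update K1 K2 := rfl
  rw [huu, ← hvals]
  simp
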